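-- pv_equiv track=rewrite | github.com/Yawn-Sean/Daily_CF_Problems | daily_problems/2026/01/0123/personal_submission/cf105803c_liryc.py | solve
-- ===== SOURCE A (Python) =====
-- def solve(n: int, k: int, a: list[int]) -> int:
--     pmin = lambda x, y: x if y < 0 or x >= 0 and x <= y else y
--     if k == n - 1:
--         cn = [0] * n
--         for x in a:
--             cn[x % n] += 1
--         s, c = 0, 0
--         for r in range(n):
--             if cn[r]:
--                 s += r * cn[r]
--                 c += cn[r]
--         rs, rc = 0, 0
--         ans = -1
--         for r in range(n - 1, -1, -1):
--             if cn[r]: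
--                 ans = pmin(ans, r * c - s + rs + r * rc)
--                 s, c = s - r * cn[r], c - cn[r]
--                 rs += (-r % n) * cn[r]
--                 rc += cn[r]
--         return ans
--     else:
--         return -sum(a) % n
-- ===== SOURCE B (Python) =====
-- def solve(n: int, k: int, a: list[int]) -> int:
--     if k != n - 1:
--         return -sum(a) % n
--     return min((sum((r - x) % n for x in a) for r in {x % n for x in a}), default=-1)
-- ===== Notes on version B (the rewrite author's own statement) =====
-- stated objective: simpler
-- what changed: Replaces A's counting table and four-accumulator descending sweep by a brute-force minimum: for each distinct residue r it directly sums (r - x) % n over all elements and takes min with default -1; no counters, no suffix state, no sweep order.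
import Mathlib
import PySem

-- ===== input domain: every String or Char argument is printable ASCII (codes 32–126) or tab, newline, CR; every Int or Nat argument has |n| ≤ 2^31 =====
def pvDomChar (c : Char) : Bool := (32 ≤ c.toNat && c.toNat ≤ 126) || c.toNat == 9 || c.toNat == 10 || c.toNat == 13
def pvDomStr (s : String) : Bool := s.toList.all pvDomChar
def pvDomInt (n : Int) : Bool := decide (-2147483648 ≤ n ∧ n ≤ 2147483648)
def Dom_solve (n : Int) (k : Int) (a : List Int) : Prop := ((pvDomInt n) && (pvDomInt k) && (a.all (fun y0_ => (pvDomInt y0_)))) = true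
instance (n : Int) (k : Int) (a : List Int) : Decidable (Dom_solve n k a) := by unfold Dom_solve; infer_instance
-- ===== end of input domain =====

-- B replaces A's counting table and four-accumulator descending sweep by a brute-force
-- minimum: for each distinct residue r it sums (r - x) % n over all elements directly and
-- takes the minimum with default -1 (objective: simpler).

-- ===== PORT A =====
-- A's local lambda 'pmin'
def pyPmin (x y : Int) : Int := if y < 0 ∨ (0 ≤ x ∧ x ≤ y) then x else y

-- Port of A. The write 'cn[x % n] += 1' is ported with List.set on index (x % n).toNat:
-- on Pre_ (n ≥ 1) the index x % n lies in [0, n), so this is exact; for n ≤ 0 with a ≠ []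
-- Python raises (IndexError/ZeroDivisionError) and those inputs are outside Pre_.
def solve (n : Int) (k : Int) (a : List Int) : Int :=
  if k = n - 1 then
    let cn : List Int := a.foldl
      (fun cn x =>
        cn.set (PySem.Int.mod x n).toNat (PySem.List.pyGetD cn (PySem.Int.mod x n) 0 + 1))
      (List.replicate n.toNat 0)
    let sc : Int × Int := (PySem.List.pyRange 0 n 1).foldl
      (fun sc r =>
        if PySem.List.pyGetD cn r 0 ≠ 0 then
          (sc.1 + r * PySem.List.pyGetD cn r 0, sc.2 + PySem.List.pyGetD cn r 0)
        else sc)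
      (0, 0)
    let st : Int × Int × Int × Int × Int := (PySem.List.pyRange (n - 1) (-1) (-1)).foldl
      (fun st r =>
        if PySem.List.pyGetD cn r 0 ≠ 0 then
          (st.1 - r * PySem.List.pyGetD cn r 0,
           st.2.1 - PySem.List.pyGetD cn r 0,
           st.2.2.1 + PySem.Int.mod (-r) n * PySem.List.pyGetD cn r 0,
           st.2.2.2.1 + PySem.List.pyGetD cn r 0,
           pyPmin st.2.2.2.2 (r * st.2.1 - st.1 + st.2.2.1 + r * st.2.2.2.1))
        else st)
      (sc.1, sc.2, 0, 0, -1)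
    st.2.2.2.2
  else
    PySem.Int.mod (-(a.foldl (· + ·) 0)) n

-- ===== PORT B =====
-- Port of B (Source B): min((sum((r - x) % n for x in a) for r in {x % n for x in a}), default=-1).
-- The generator 'sum((r - x) % n for x in a)' becomes the helper below; min(..., default=-1)
-- becomes an Option-valued running-minimum fold (the minimum VALUE does not depend on the
-- set's iteration order, so folding the PySem.Set's element list is exact).
def pyMinStep (n : Int) (a : List Int) (acc : Option Int) (r : Int) : Option Int :=
  let cost := a.foldl (fun s x => s + PySem.Int.mod (r - x) n) 0
  match acc with
  | none => some cost
  | some b => some (if cost < b then cost else b)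

def solve_alt (n : Int) (k : Int) (a : List Int) : Int :=
  if k ≠ n - 1 then
    PySem.Int.mod (-(a.foldl (· + ·) 0)) n
  else
    match (PySem.Set.ofList (a.map (fun x => PySem.Int.mod x n))).foldl (pyMinStep n a) none with
    | none => -1
    | some v => v

-- ===== PRECONDITION & SPEC =====
-- Pre_ excludes exactly the inputs on which A raises: k = n - 1 with n ≤ 0 and a ≠ []
-- (ZeroDivisionError for n = 0, IndexError into the empty table for n < 0), and
-- k ≠ n - 1 with n = 0 (ZeroDivisionError in '-sum(a) % n').  A returns on all of Pre_.
def Pre_solve (n : Int) (k : Int) (a : List Int) : Prop :=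
  (k = n - 1 ∧ (1 ≤ n ∨ a = [])) ∨ (k ≠ n - 1 ∧ n ≠ 0)
instance (n : Int) (k : Int) (a : List Int) : Decidable (Pre_solve n k a) := by
  unfold Pre_solve; infer_instance

def pvWitness_solve : Int × Int × List Int := (3, 2, [1, 5, 7])

def Spec_solve (n : Int) (k : Int) (a : List Int) (out : Int) : Prop := out = solve_alt n k a
instance (n : Int) (k : Int) (a : List Int) (out : Int) : Decidable (Spec_solve n k a out) := by
  unfold Spec_solve; infer_instance

-- ===== CLAIM (what is proved, stated in full; the proofs are below) =====
def Claim_equal_solve : Prop := ∀ (n : Int) (k : Int) (a : List Int),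
  Dom_solve n k a → Pre_solve n k a → Spec_solve n k a (solve n k a)

-- ===== LEMMAS AND PROOFS =====

-- the closed-form cost of choosing residue r, over the residue list res
def pvCost (n : Int) (res : List Int) (r : Int) : Int :=
  r * (res.length : Int) - res.sum + n * ((res.countP (fun ρ => decide (r < ρ)) : Nat) : Int)

-- abstract running-minimum step over a cost function g
def pvOptStep (g : Int → Int) (acc : Option Int) (r : Int) : Option Int :=
  match acc with
  | none => some (g r)
  | some b => some (if g r < b then g r else b)

-- the abstract body of A's third loop (over counts of the residue list)
def pvStepA (n : Int) (res : List Int) (st : Int × Int × Int × Int × Int) (r : Int) :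
    Int × Int × Int × Int × Int :=
  (st.1 - r * (res.count r : Int),
   st.2.1 - (res.count r : Int),
   st.2.2.1 + PySem.Int.mod (-r) n * (res.count r : Int),
   st.2.2.2.1 + (res.count r : Int),
   pyPmin st.2.2.2.2 (r * st.2.1 - st.1 + st.2.2.1 + r * st.2.2.2.1))

lemma pv_foldl_add_map (f : Int → Int) : ∀ (L : List Int) (init : Int),
    L.foldl (fun s x => s + f x) init = init + (L.map f).sum := by
  intro L
  induction L with
  | nil => intro init; simp
  | cons x t ih => intro init; simp [List.foldl_cons, ih, add_assoc]

lemma pv_cn_build (n : Int) (hn : 0 < n) : ∀ (a : List Int) (cn0 : List Int),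
    cn0.length = n.toNat → ∀ r : Int, 0 ≤ r → r < n →
    PySem.List.pyGetD
      (a.foldl (fun cn x =>
          cn.set (PySem.Int.mod x n).toNat (PySem.List.pyGetD cn (PySem.Int.mod x n) 0 + 1))
        cn0) r 0
      = PySem.List.pyGetD cn0 r 0 + ((a.map (fun x => PySem.Int.mod x n)).count r : Int) := by
  intro a
  induction a with
  | nil => intro cn0 _ r _ _; simp
  | cons x t ih =>
    intro cn0 hlen r hr0 hrn
    have hm0 : 0 ≤ PySem.Int.mod x n := PySem.Int.mod_nonneg x hn
    have hmn : PySem.Int.mod x n < n := PySem.Int.mod_lt x hn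
    have hmlt : (PySem.Int.mod x n).toNat < cn0.length := by rw [hlen]; omega
    simp only [List.foldl_cons]
    rw [ih _ (by simp [hlen]) r hr0 hrn]
    by_cases hxr : PySem.Int.mod x n = r
    · have hcount : ((List.map (fun x => PySem.Int.mod x n) (x :: t)).count r : Int)
          = ((List.map (fun x => PySem.Int.mod x n) t).count r : Int) + 1 := by
        rw [List.map_cons, List.count_cons]
        simp [hxr]
      rw [hcount, hxr]
      rw [PySem.List.pyGetD_of_nonneg _ _ hr0, List.getD_eq_getElem?_getD,
        List.getElem?_set_self (by omega), Option.getD_some,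
        PySem.List.pyGetD_of_nonneg _ _ hr0, List.getD_eq_getElem?_getD]
      ring
    · have hcount : ((List.map (fun x => PySem.Int.mod x n) (x :: t)).count r : Int)
          = ((List.map (fun x => PySem.Int.mod x n) t).count r : Int) := by
        rw [List.map_cons, List.count_cons]
        simp [hxr]
      rw [hcount]
      rw [PySem.List.pyGetD_of_nonneg _ _ hr0, List.getD_eq_getElem?_getD,
        List.getElem?_set_ne (by omega), ← List.getD_eq_getElem?_getD,
        ← PySem.List.pyGetD_of_nonneg _ _ hr0]

def pvStepSC (res : List Int) (sc : Int × Int) (r : Int) : Int × Int :=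
  if (res.count r : Int) ≠ 0 then (sc.1 + r * (res.count r : Int), sc.2 + (res.count r : Int))
  else sc

lemma pv_foldl_sc (res : List Int) : ∀ (L : List Int) (s0 c0 : Int),
    L.foldl (pvStepSC res) (s0, c0)
      = (s0 + (L.map (fun r => r * (res.count r : Int))).sum,
         c0 + (L.map (fun r => (res.count r : Int))).sum) := by
  intro L
  induction L with
  | nil => intro s0 c0; simp
  | cons r t ih =>
    intro s0 c0
    by_cases h : (res.count r : Int) = 0
    · simp [List.foldl_cons, pvStepSC, h, ih, add_assoc]
    · simp only [List.foldl_cons, pvStepSC, if_pos h, List.map_cons, List.sum_cons]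
      rw [ih]
      simp only [Prod.mk.injEq]
      constructor <;> ring

lemma pv_sum_indicator_zero (ρ : Int) : ∀ L : List Int, ρ ∉ L →
    (L.map (fun r => if r = ρ then r else 0)).sum = 0
    ∧ (L.map (fun r => (if r = ρ then (1 : Int) else 0))).sum = 0 := by
  intro L
  induction L with
  | nil => intro _; simp
  | cons x t ih =>
    intro h
    have hx : x ≠ ρ := by intro he; exact h (by simp [he])
    have ht := ih (fun hm => h (by simp [hm]))
    simp [hx, ht.1, ht.2]

lemma pv_sum_indicator (ρ : Int) : ∀ L : List Int, L.Nodup → ρ ∈ L →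
    (L.map (fun r => if r = ρ then r else 0)).sum = ρ
    ∧ (L.map (fun r => (if r = ρ then (1 : Int) else 0))).sum = 1 := by
  intro L
  induction L with
  | nil => intro _ h; simp at h
  | cons x t ih =>
    intro hnd hmem
    rcases List.mem_cons.mp hmem with he | hmem'
    · subst he
      have hnot : ρ ∉ t := (List.nodup_cons.mp hnd).1
      have hz := pv_sum_indicator_zero ρ t hnot
      simp [hz.1, hz.2]
    · have hx : x ≠ ρ := by
        intro he; subst he; exact (List.nodup_cons.mp hnd).1 hmem'
      have ht := ih (List.nodup_cons.mp hnd).2 hmem'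
      simp [hx, ht.1, ht.2]

lemma pv_range_count_sums (n : Int) (hn : 0 < n) : ∀ res : List Int,
    (∀ ρ ∈ res, 0 ≤ ρ ∧ ρ < n) →
    ((PySem.List.pyRange 0 n 1).map (fun r => r * (res.count r : Int))).sum = res.sum
    ∧ ((PySem.List.pyRange 0 n 1).map (fun r => (res.count r : Int))).sum = (res.length : Int) := by
  intro res
  induction res with
  | nil => intro _; simp
  | cons ρ t ih =>
    intro h
    have hρ := h ρ (by simp)
    have ht := ih (fun x hx => h x (by simp [hx]))
    have hρmem : ρ ∈ PySem.List.pyRange 0 n 1 := by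
      rw [PySem.List.mem_pyRange_one]; omega
    have hnd : (PySem.List.pyRange 0 n 1).Nodup := PySem.List.nodup_pyRange_one 0 n
    have hind := pv_sum_indicator ρ _ hnd hρmem
    have hc1 : (fun r => r * (((ρ :: t).count r : Nat) : Int))
        = fun r => r * (t.count r : Int) + (if r = ρ then r else 0) := by
      funext r
      by_cases hr : r = ρ
      · subst hr
        simp [List.count_cons]
        push_cast
        ring
      · have hb : (ρ == r) = false := by simp [Ne.symm hr]
        simp [List.count_cons, hb, hr]
    have hc2 : (fun r => (((ρ :: t).count r : Nat) : Int))
        = fun r => (t.count r : Int) + (if r = ρ then (1 : Int) else 0) := by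
      funext r
      by_cases hr : r = ρ
      · subst hr
        simp [List.count_cons]
      · have hb : (ρ == r) = false := by simp [Ne.symm hr]
        simp [List.count_cons, hb, hr]
    constructor
    · rw [hc1]
      have hsplit : ((PySem.List.pyRange 0 n 1).map
          (fun r => r * (t.count r : Int) + (if r = ρ then r else 0))).sum
          = ((PySem.List.pyRange 0 n 1).map (fun r => r * (t.count r : Int))).sum
            + ((PySem.List.pyRange 0 n 1).map (fun r => (if r = ρ then r else 0))).sum := by
        rw [← List.sum_map_add]
      rw [hsplit, ht.1, hind.1, List.sum_cons]
      ring
    · rw [hc2]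
      have hsplit : ((PySem.List.pyRange 0 n 1).map
          (fun r => (t.count r : Int) + (if r = ρ then (1 : Int) else 0))).sum
          = ((PySem.List.pyRange 0 n 1).map (fun r => (t.count r : Int))).sum
            + ((PySem.List.pyRange 0 n 1).map (fun r => (if r = ρ then (1 : Int) else 0))).sum := by
        rw [← List.sum_map_add]
      rw [hsplit, ht.2, hind.2, List.length_cons]
      push_cast
      ring

lemma pv_foldl_guard_filter {σ : Type} (f : σ → Int → σ) (p : Int → Prop) [DecidablePred p] :
    ∀ (L : List Int) (init : σ),
      L.foldl (fun st r => if p r then f st r else st) init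
        = (L.filter (fun r => decide (p r))).foldl f init := by
  intro L
  induction L with
  | nil => intro init; rfl
  | cons r t ih =>
    intro init
    by_cases h : p r
    · simp [List.foldl_cons, List.filter_cons, h, ih]
    · simp [List.foldl_cons, List.filter_cons, h, ih]

lemma pv_mod_neg_eq_sub (n r : Int) (h0 : 0 < r) (h1 : r < n) :
    PySem.Int.mod (-r) n = n - r := by
  rw [PySem.Int.mod_eq_emod_of_pos (by omega)]
  have h2 : (-r) % n = (n - r) % n := by
    conv_lhs => rw [show -r = (n - r) + n * (-1) by ring]
    rw [Int.add_mul_emod_self_left]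
  rw [h2, Int.emod_eq_of_lt (by omega) (by omega)]

-- (r - x) % n decomposed over the residue of x (the pointwise form of B's brute-force cost)
lemma pv_mod_sub (n r x : Int) (hn : 0 < n) (h0 : 0 ≤ r) (h1 : r < n) :
    PySem.Int.mod (r - x) n
      = r - PySem.Int.mod x n + (if r < PySem.Int.mod x n then n else 0) := by
  have hmx : PySem.Int.mod x n = x % n := PySem.Int.mod_eq_emod_of_pos hn
  rw [PySem.Int.mod_eq_emod_of_pos hn, hmx]
  have hρ0 : 0 ≤ x % n := Int.emod_nonneg x (by omega)
  have hρn : x % n < n := Int.emod_lt_of_pos x hn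
  have hx : x = n * (x / n) + x % n := (Int.ediv_add_emod x n).symm
  have key : (r - x) % n = (r - x % n) % n := by
    conv_lhs => rw [hx]
    rw [show r - (n * (x / n) + x % n) = r - x % n + n * (-(x / n)) from by ring,
      Int.add_mul_emod_self_left]
  by_cases h : r < x % n
  · rw [if_pos h, key]
    have hsh : (r - x % n) % n = (r - x % n + n) % n := by
      conv_rhs => rw [show r - x % n + n = (r - x % n) + n * 1 by ring]
      rw [Int.add_mul_emod_self_left]
    rw [hsh, Int.emod_eq_of_lt (by omega) (by omega)]
  · rw [if_neg h, key, Int.emod_eq_of_lt (by omega) (by omega)]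
    omega

-- B's brute-force sum equals the closed-form cost over the residue list
lemma pv_cost_eq (n r : Int) (hn : 0 < n) (h0 : 0 ≤ r) (h1 : r < n) : ∀ a : List Int,
    (a.map (fun x => PySem.Int.mod (r - x) n)).sum
      = pvCost n (a.map (fun x => PySem.Int.mod x n)) r := by
  intro a
  induction a with
  | nil => simp [pvCost]
  | cons x t ih =>
    simp only [List.map_cons, List.sum_cons, pvCost, List.length_cons, List.countP_cons] at *
    rw [pv_mod_sub n r x hn h0 h1, ih]
    by_cases h : r < PySem.Int.mod x n
    · simp only [h, decide_true, if_pos, if_true]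
      push_cast
      ring
    · have hd : decide (r < PySem.Int.mod x n) = false := by simp [h]
      rw [if_neg h, hd]
      simp only [Bool.false_eq_true, if_false, add_zero]
      push_cast
      ring

lemma pv_countP_le_split (r : Int) : ∀ res : List Int,
    res.countP (fun ρ => decide (r ≤ ρ))
      = res.countP (fun ρ => decide (r < ρ)) + res.count r := by
  intro res
  induction res with
  | nil => simp
  | cons x t ih =>
    simp only [List.countP_cons, List.count_cons, ih]
    by_cases h3 : x = r
    · subst h3
      simp
      omega
    · have hb : (x == r) = false := by simp [h3]
      rw [hb]
      by_cases h1 : r ≤ x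
      · have h2 : r < x := by omega
        simp [h1, h2]
        omega
      · have h2 : ¬ r < x := by omega
        simp [h1, h2]

lemma pv_cost_nonneg (n r : Int) (h0 : 0 ≤ r) (h1 : r < n) : ∀ res : List Int,
    (∀ ρ ∈ res, 0 ≤ ρ ∧ ρ < n) → 0 ≤ pvCost n res r := by
  intro res
  induction res with
  | nil => intro _; simp [pvCost]
  | cons ρ t ih =>
    intro h
    have hρ := h ρ (by simp)
    have ht := ih (fun x hx => h x (by simp [hx]))
    simp only [pvCost, List.length_cons, List.sum_cons, List.countP_cons] at *
    by_cases hc : r < ρ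
    · simp only [hc, decide_true, if_pos]
      push_cast
      nlinarith [ht]
    · have : decide (r < ρ) = false := by simp [hc]
      simp only [this, Bool.false_eq_true, if_false, add_zero]
      push_cast
      nlinarith [ht]

-- A's third loop computes a pyPmin-fold of the closed-form costs over the support list
lemma pv_loop_A (n : Int) (hn : 0 < n) (res : List Int)
    (hres : ∀ ρ ∈ res, 0 ≤ ρ ∧ ρ < n) :
    ∀ (L : List Int) (bnd s c rs rc ans : Int),
      L.Pairwise (· > ·) →
      (∀ r ∈ L, 0 ≤ r ∧ r < bnd ∧ r ∈ res) →
      bnd ≤ n →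
      (∀ ρ ∈ res, ρ < bnd → ρ ∈ L) →
      c + rc = (res.length : Int) →
      rs - s = n * ((res.countP (fun ρ => decide (bnd ≤ ρ)) : Nat) : Int) - res.sum →
      (L.foldl (pvStepA n res) (s, c, rs, rc, ans)).2.2.2.2
        = L.foldl (fun m r => pyPmin m (pvCost n res r)) ans := by
  intro L
  induction L with
  | nil => intro bnd s c rs rc ans _ _ _ _ _ _; rfl
  | cons r t ih =>
    intro bnd s c rs rc ans hpw hmem hbnd hcomp hcrc hrss
    obtain ⟨hr0, hrbnd, hrres⟩ := hmem r (by simp)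
    have hrn : r < n := lt_of_lt_of_le hrbnd hbnd
    have htlt : ∀ x ∈ t, x < r := fun x hx => (List.pairwise_cons.mp hpw).1 x hx
    have hgt' : ((res.countP (fun ρ => decide (bnd ≤ ρ)) : Nat) : Int)
        = ((res.countP (fun ρ => decide (r < ρ)) : Nat) : Int) := by
      have hcp : res.countP (fun ρ => decide (bnd ≤ ρ))
          = res.countP (fun ρ => decide (r < ρ)) := by
        apply List.countP_congr
        intro ρ hρ
        have hρb := hres ρ hρ
        simp only [decide_eq_true_eq]
        constructor
        · intro hb; omega
        · intro hlt
          by_contra hnb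
          push_neg at hnb
          have hρL : ρ ∈ r :: t := hcomp ρ hρ (by omega)
          rcases List.mem_cons.mp hρL with he | hm
          · omega
          · have := htlt ρ hm; omega
      rw [hcp]
    have hcost : r * c - s + rs + r * rc = pvCost n res r := by
      have h1 : r * c + r * rc = r * (res.length : Int) := by
        rw [← mul_add, hcrc]
      simp only [pvCost]
      rw [← hgt']
      linarith [hrss]
    simp only [List.foldl_cons]
    by_cases hr : r = 0
    · -- r = 0: descending nonnegative list ⇒ t = []
      have ht : t = [] := by
        cases t with
        | nil => rfl
        | cons x xs =>
          exfalso
          have hx := hmem x (by simp)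
          have := htlt x (by simp)
          omega
      subst ht
      simp only [List.foldl_nil, pvStepA]
      rw [hcost]
    · have hrpos : 0 < r := by omega
      have hmodneg : PySem.Int.mod (-r) n = n - r := pv_mod_neg_eq_sub n r hrpos hrn
      have hstep :
          pvStepA n res (s, c, rs, rc, ans) r
            = (s - r * (res.count r : Int), c - (res.count r : Int),
               rs + (n - r) * (res.count r : Int), rc + (res.count r : Int),
               pyPmin ans (r * c - s + rs + r * rc)) := by
        simp [pvStepA, hmodneg]
      rw [hstep, hcost]
      apply ih r _ _ _ _ _
        ((List.pairwise_cons.mp hpw).2)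
        (fun x hx => ⟨(hmem x (by simp [hx])).1, htlt x hx, (hmem x (by simp [hx])).2.2⟩)
        (by omega)
        (fun ρ hρ hρr => by
          have hρL : ρ ∈ r :: t := hcomp ρ hρ (by omega)
          rcases List.mem_cons.mp hρL with he | hm
          · omega
          · exact hm)
        (by push_cast; push_cast at hcrc; linarith)
        (by
          rw [hgt'] at hrss
          have hsplit := pv_countP_le_split r res
          have : ((res.countP (fun ρ => decide (r ≤ ρ)) : Nat) : Int)
              = ((res.countP (fun ρ => decide (r < ρ)) : Nat) : Int) + (res.count r : Int) := by
            rw [hsplit]; push_cast; ring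
          rw [this]
          linarith [hrss])

-- the pyPmin-fold starting at -1 over nonnegative costs equals the option-min fold
lemma pv_pmin_opt (g : Int → Int) : ∀ (L : List Int) (ans : Int) (o : Option Int),
    (∀ r ∈ L, 0 ≤ g r) →
    ((ans = -1 ∧ o = none) ∨ (0 ≤ ans ∧ o = some ans)) →
    L.foldl (fun m r => pyPmin m (g r)) ans
      = (match L.foldl (pvOptStep g) o with | none => -1 | some v => v) := by
  intro L
  induction L with
  | nil =>
    intro ans o _ hinv
    rcases hinv with ⟨h1, h2⟩ | ⟨_, h2⟩
    · simp [h1, h2]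
    · simp [h2]
  | cons r t ih =>
    intro ans o hpos hinv
    have hg : 0 ≤ g r := hpos r (by simp)
    simp only [List.foldl_cons]
    rcases hinv with ⟨h1, h2⟩ | ⟨h1, h2⟩
    · subst h1 h2
      have hA : pyPmin (-1) (g r) = g r := by
        simp only [pyPmin]
        rw [if_neg (by omega)]
      rw [hA]
      exact ih _ _ (fun x hx => hpos x (by simp [hx])) (Or.inr ⟨hg, rfl⟩)
    · subst h2
      have hA : pyPmin ans (g r) = (if g r < ans then g r else ans) := by
        simp only [pyPmin]
        split_ifs <;> omega
      have hB : pvOptStep g (some ans) r = some (if g r < ans then g r else ans) := by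
        simp [pvOptStep]
      rw [hA, hB]
      exact ih _ _ (fun x hx => hpos x (by simp [hx]))
        (Or.inr ⟨by split_ifs <;> omega, rfl⟩)

-- the option-min fold is invariant under permutation of the candidate list
lemma pv_optfold_perm (g : Int → Int) : ∀ {L1 L2 : List Int}, L1.Perm L2 →
    ∀ o : Option Int, L1.foldl (pvOptStep g) o = L2.foldl (pvOptStep g) o := by
  intro L1 L2 hp
  induction hp with
  | nil => intro o; rfl
  | cons x _ ih => intro o; simp only [List.foldl_cons]; exact ih _
  | swap x y l =>
    intro o
    simp only [List.foldl_cons]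
    congr 1
    cases o with
    | none =>
      simp only [pvOptStep]
      congr 1
      split_ifs <;> omega
    | some b =>
      simp only [pvOptStep]
      congr 1
      split_ifs <;> omega
  | trans _ _ ih1 ih2 => intro o; rw [ih1, ih2]

-- membership characterisation of the descending support list
lemma pv_memL0 (n : Int) (hn : 0 < n) (res : List Int)
    (hres : ∀ ρ ∈ res, 0 ≤ ρ ∧ ρ < n) (x : Int) :
    x ∈ (PySem.List.pyRange (n - 1) (-1) (-1)).filter (fun r => decide (r ∈ res))
      ↔ x ∈ res := by
  constructor
  · intro hx
    have := List.mem_filter.mp hx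
    exact of_decide_eq_true this.2
  · intro hx
    apply List.mem_filter.mpr
    refine ⟨?_, decide_eq_true hx⟩
    rw [PySem.List.mem_pyRange_neg_one]
    have := hres x hx
    omega

lemma pv_L0_pairwise (n : Int) (res : List Int) :
    ((PySem.List.pyRange (n - 1) (-1) (-1)).filter (fun r => decide (r ∈ res))).Pairwise
      (· > ·) := by
  apply List.Pairwise.filter
  rw [PySem.List.pyRange_neg_one_eq_reverse]
  rw [List.pairwise_reverse]
  exact PySem.List.pairwise_lt_pyRange_one _ _

lemma pv_L0_nodup (n : Int) (res : List Int) :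
    ((PySem.List.pyRange (n - 1) (-1) (-1)).filter (fun r => decide (r ∈ res))).Nodup := by
  apply List.Nodup.filter
  rw [PySem.List.pyRange_neg_one_eq_reverse]
  exact List.nodup_reverse.mpr (PySem.List.nodup_pyRange_one _ _)

-- ===== VERDICT (by name: the statement is the Claim_ definition above) =====
theorem solve_spec : Claim_equal_solve := by
  intro n k a _hdom hpre
  unfold Spec_solve
  by_cases hk : k = n - 1
  · subst hk
    by_cases hn1 : 1 ≤ n
    · -- main case: k = n - 1, n ≥ 1
      have hn0 : 0 < n := hn1
      simp only [solve, solve_alt, ne_eq, not_true_eq_false, if_false, if_pos rfl,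
        eq_self_iff_true, if_true, ite_true, ite_false]
      set res : List Int := a.map (fun x => PySem.Int.mod x n) with hres_def
      have hresb : ∀ ρ ∈ res, 0 ≤ ρ ∧ ρ < n := by
        intro ρ hρ
        rw [hres_def] at hρ
        obtain ⟨x, _, rfl⟩ := List.mem_map.mp hρ
        exact ⟨PySem.Int.mod_nonneg x hn0, PySem.Int.mod_lt x hn0⟩
      set cn : List Int := a.foldl
        (fun cn x =>
          cn.set (PySem.Int.mod x n).toNat (PySem.List.pyGetD cn (PySem.Int.mod x n) 0 + 1))
        (List.replicate n.toNat 0) with hcn_def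
      have hcn : ∀ r : Int, 0 ≤ r → r < n →
          PySem.List.pyGetD cn r 0 = (res.count r : Int) := by
        intro r h0 h1
        rw [hcn_def, pv_cn_build n hn0 a _ (by simp) r h0 h1]
        have hrep : PySem.List.pyGetD (List.replicate n.toNat (0 : Int)) r 0 = 0 := by
          rw [PySem.List.pyGetD_of_nonneg _ _ h0, List.getD_eq_getElem?_getD,
            List.getElem?_replicate]
          split <;> rfl
        rw [hrep, zero_add, ← hres_def]
      -- second loop of A computes (res.sum, res.length)
      have h2 : (PySem.List.pyRange 0 n 1).foldl
          (fun sc r =>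
            if PySem.List.pyGetD cn r 0 ≠ 0 then
              (sc.1 + r * PySem.List.pyGetD cn r 0, sc.2 + PySem.List.pyGetD cn r 0)
            else sc)
          (0, 0) = (res.sum, (res.length : Int)) := by
        rw [PySem.List.foldl_congr_mem _ _ (pvStepSC res) _ ?hag]
        case hag =>
          intro acc r hr
          have hb := PySem.List.mem_pyRange_one.mp hr
          rw [hcn r hb.1 hb.2]
          rfl
        rw [pv_foldl_sc res]
        rw [(pv_range_count_sums n hn0 res hresb).1, (pv_range_count_sums n hn0 res hresb).2]
        simp
      rw [h2]
      -- third loop of A is a fold of pvStepA over the descending support list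
      have h3 : (PySem.List.pyRange (n - 1) (-1) (-1)).foldl
          (fun st r =>
            if PySem.List.pyGetD cn r 0 ≠ 0 then
              (st.1 - r * PySem.List.pyGetD cn r 0,
               st.2.1 - PySem.List.pyGetD cn r 0,
               st.2.2.1 + PySem.Int.mod (-r) n * PySem.List.pyGetD cn r 0,
               st.2.2.2.1 + PySem.List.pyGetD cn r 0,
               pyPmin st.2.2.2.2 (r * st.2.1 - st.1 + st.2.2.1 + r * st.2.2.2.1))
            else st)
          ((res.sum, (res.length : Int)).1, (res.sum, (res.length : Int)).2, 0, 0, -1)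
          = ((PySem.List.pyRange (n - 1) (-1) (-1)).filter
              (fun r => decide (r ∈ res))).foldl (pvStepA n res)
              (res.sum, (res.length : Int), 0, 0, -1) := by
        rw [PySem.List.foldl_congr_mem _ _
          (fun st r => if r ∈ res then pvStepA n res st r else st) _ ?hag3]
        case hag3 =>
          intro acc r hr
          have hb := PySem.List.mem_pyRange_neg_one.mp hr
          rw [hcn r (by omega) (by omega)]
          by_cases hm : r ∈ res
          · have hc : (res.count r : Int) ≠ 0 := by
              have := List.count_pos_iff.mpr hm
              omega
            show _ = if r ∈ res then pvStepA n res acc r else acc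
            rw [if_pos hm, if_pos hc]
            rfl
          · have hc0 : res.count r = 0 := List.count_eq_zero.mpr hm
            show _ = if r ∈ res then pvStepA n res acc r else acc
            rw [if_neg hm, if_neg (show ¬((res.count r : Int) ≠ 0) by simp [hc0])]
        rw [pv_foldl_guard_filter (pvStepA n res) (fun r => r ∈ res)]
      rw [h3]
      set L0 : List Int :=
        (PySem.List.pyRange (n - 1) (-1) (-1)).filter (fun r => decide (r ∈ res)) with hL0
      -- A's loop → pyPmin-fold of closed-form costs over L0
      rw [pv_loop_A n hn0 res hresb L0 n res.sum (res.length : Int) 0 0 (-1)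
        (pv_L0_pairwise n res)
        (fun r hr => by
          have hm := (pv_memL0 n hn0 res hresb r).mp hr
          have := hresb r hm
          exact ⟨this.1, this.2, hm⟩)
        le_rfl
        (fun ρ hρ _ => (pv_memL0 n hn0 res hresb ρ).mpr hρ)
        (by simp)
        (by
          have : res.countP (fun ρ => decide (n ≤ ρ)) = 0 := by
            apply List.countP_eq_zero.mpr
            intro ρ hρ
            have := hresb ρ hρ
            simp
            omega
          rw [this]
          ring)]
      -- pyPmin-fold → option-min fold over L0
      rw [pv_pmin_opt (pvCost n res) L0 (-1) none
        (fun r hr => by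
          have hm := (pv_memL0 n hn0 res hresb r).mp hr
          have := hresb r hm
          exact pv_cost_nonneg n r this.1 this.2 res hresb)
        (Or.inl ⟨rfl, rfl⟩)]
      -- B's fold is the same option-min fold over the (permuted) distinct residues
      have hperm : L0.Perm (PySem.Set.ofList res) := by
        apply List.perm_of_nodup_nodup_toFinset_eq (pv_L0_nodup n res)
          (PySem.Set.nodup_ofList res)
        ext x
        simp only [List.mem_toFinset]
        rw [pv_memL0 n hn0 res hresb, PySem.Set.mem_ofList res x]
      rw [pv_optfold_perm (pvCost n res) hperm none]
      have hB : (PySem.Set.ofList res).foldl (pyMinStep n a) none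
          = (PySem.Set.ofList res).foldl (pvOptStep (pvCost n res)) none := by
        apply PySem.List.foldl_congr_mem
        intro acc r hr
        have hm : r ∈ res := (PySem.Set.mem_ofList res r).mp hr
        have hb := hresb r hm
        simp only [pyMinStep, pvOptStep]
        rw [pv_foldl_add_map (fun x => PySem.Int.mod (r - x) n) a 0, zero_add,
          pv_cost_eq n r hn0 hb.1 hb.2 a]
      rw [hB]
    · -- k = n - 1 and n ≤ 0: Pre_ forces a = [], both sides return -1
      have ha : a = [] := by
        rcases hpre with ⟨_, h⟩ | ⟨h, _⟩
        · rcases h with h | h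
          · omega
          · exact h
        · exact absurd rfl h
      subst ha
      have hr1 : PySem.List.pyRange 0 n 1 = [] := by
        rw [PySem.List.pyRange_one]
        have : (n - 0).toNat = 0 := by omega
        rw [this]
        rfl
      have hr2 : PySem.List.pyRange (n - 1) (-1) (-1) = [] :=
        PySem.List.pyRange_neg_one_eq_nil (by omega)
      simp only [solve, solve_alt, ne_eq, not_true_eq_false, if_false, if_pos rfl,
        eq_self_iff_true, if_true, ite_true, ite_false, hr1, hr2, List.foldl_nil,
        List.map_nil]
      rfl
  · -- k ≠ n - 1: both sides are '-sum(a) % n'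
    simp only [solve, solve_alt, if_neg hk, ne_eq, hk, not_false_eq_true, if_pos, ite_true,
      ite_false]
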